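-- pv_equiv track=rewrite | github.com/AdamLabiosa/when_can_i_follow | when_can_i_follow/envs/lava/env.py | _actions_to_world_coords
-- ===== SOURCE A (Python) =====
-- _DIR_VECS = [(1, 0), (0, 1), (-1, 0), (0, -1)]
--
-- def _actions_to_world_coords(
--
--     start_pos: tuple[int, int],
--     start_dir: int,
--     actions: list[int],
-- ) -> list[tuple[int, int]]:
--     """Replay a list of actions from a starting state and return every world
--     cell entered by a forward move (in order)."""
--     x, y = start_pos
--     d = start_dir
--     coords: list[tuple[int, int]] = []
--     for action in actions:
--         if action == 0:      # turn left
--             d = (d - 1) % 4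
--         elif action == 1:    # turn right
--             d = (d + 1) % 4
--         else:                # forward
--             dx, dy = _DIR_VECS[d]
--             x, y = x + dx, y + dy
--             coords.append((x, y))
--     return coords
-- ===== SOURCE B (Python) =====
-- _DIR_VECS = [(1, 0), (0, 1), (-1, 0), (0, -1)]
--
-- def _actions_to_world_coords(start_pos, start_dir, actions):
--     # Stage 1: heading BEFORE each action, as a branch-free running sum of turn signs.
--     headings = []
--     h = start_dir
--     for a in actions:
--         headings.append(h)
--         h += (a == 1) - (a == 0)
--     # Stage 2: movement vector of each forward action (heading reduced mod 4).
--     deltas = [_DIR_VECS[h % 4] for a, h in zip(actions, headings) if a != 0 and a != 1]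
--     # Stage 3: prefix-sum the deltas from start_pos.
--     coords = []
--     x, y = start_pos
--     for dx, dy in deltas:
--         x, y = x + dx, y + dy
--         coords.append((x, y))
--     return coords
-- ===== Notes on version B (the rewrite author's own statement) =====
-- stated objective: alternative
-- what changed: B replaces A's single loop that threads (x,y,d) with three staged passes: a branch-free running sum of turn signs giving the heading before each action, a zip/filter/map pass selecting the movement vector of each forward action (heading reduced mod 4), and a prefix-sum pass turning the deltas into positions.
import Mathlib
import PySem

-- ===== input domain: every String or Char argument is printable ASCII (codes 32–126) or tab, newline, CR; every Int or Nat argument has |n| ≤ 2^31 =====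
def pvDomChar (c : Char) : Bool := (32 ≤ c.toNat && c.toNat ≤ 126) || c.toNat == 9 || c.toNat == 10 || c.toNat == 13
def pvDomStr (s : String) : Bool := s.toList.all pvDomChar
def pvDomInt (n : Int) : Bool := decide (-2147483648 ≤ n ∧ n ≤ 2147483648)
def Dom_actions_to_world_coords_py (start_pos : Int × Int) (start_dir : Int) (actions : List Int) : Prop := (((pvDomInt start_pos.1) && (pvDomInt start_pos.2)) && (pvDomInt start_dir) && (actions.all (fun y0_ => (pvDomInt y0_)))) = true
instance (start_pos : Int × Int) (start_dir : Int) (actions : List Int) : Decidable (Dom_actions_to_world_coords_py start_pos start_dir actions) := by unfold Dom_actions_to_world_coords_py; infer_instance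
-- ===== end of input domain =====

-- B replaces A's single (x,y,d)-threading loop by three staged passes (turn-sign running sum of
-- headings, zip/filter/map of forward deltas with the heading reduced mod 4, prefix sum of deltas);
-- alternative decomposition, same cost.


def pvDirVecs : List (Int × Int) := [(1, 0), (0, 1), (-1, 0), (0, -1)]

-- ===== PORT A =====
-- A's loop threads (x, y, d) and appends on each forward move.  `_DIR_VECS[d]` is
-- PySem.List.pyGet?; the `none` (IndexError) branch returns [] and is excluded by Pre_.
def pvGoA (x y d : Int) : List Int → List (Int × Int)
  | [] => []
  | a :: rest =>
    if a = 0 then pvGoA x y (PySem.Int.mod (d - 1) 4) rest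
    else if a = 1 then pvGoA x y (PySem.Int.mod (d + 1) 4) rest
    else
      match PySem.List.pyGet? pvDirVecs d with
      | some (dx, dy) => (x + dx, y + dy) :: pvGoA (x + dx) (y + dy) d rest
      | none => []   -- Python raises IndexError here (outside Pre_)

def actions_to_world_coords_py (start_pos : Int × Int) (start_dir : Int) (actions : List Int) : List (Int × Int) :=
  pvGoA start_pos.1 start_pos.2 start_dir actions

-- ===== PORT B =====
-- Stage 1: heading before each action, a branch-free running sum of turn signs.
def pvHeads (h : Int) : List Int → List Int
  | [] => []
  | a :: rest => h :: pvHeads (h + ((if a = 1 then (1 : Int) else 0) - (if a = 0 then 1 else 0))) rest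

-- Stage 2: movement vector of each forward action (heading reduced mod 4).
-- `_DIR_VECS[h % 4]` always hits; the `.getD` default is dead code.
def pvForwardDeltas (pairs : List (Int × Int)) : List (Int × Int) :=
  (pairs.filter (fun p => !(p.1 == 0) && !(p.1 == 1))).map
    (fun p => (PySem.List.pyGet? pvDirVecs (PySem.Int.mod p.2 4)).getD (0, 0))

-- Stage 3: running prefix sum of the deltas starting from (x, y).
def pvPrefix (x y : Int) : List (Int × Int) → List (Int × Int)
  | [] => []
  | (dx, dy) :: rest => (x + dx, y + dy) :: pvPrefix (x + dx) (y + dy) rest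

def actions_to_world_coords_py_alt (start_pos : Int × Int) (start_dir : Int) (actions : List Int) : List (Int × Int) :=
  pvPrefix start_pos.1 start_pos.2 (pvForwardDeltas (actions.zip (pvHeads start_dir actions)))

-- ===== PRECONDITION & SPEC =====
-- Pre_ excludes exactly the inputs on which A raises IndexError: a heading outside
-- [-4, 3] with a forward move as the first action (after any turn, d is in [0, 4)).
def Pre_actions_to_world_coords_py (start_pos : Int × Int) (start_dir : Int) (actions : List Int) : Prop :=
  (-4 ≤ start_dir ∧ start_dir < 4) ∨ actions.head? = some 0 ∨ actions.head? = some 1 ∨ actions = []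
instance (start_pos : Int × Int) (start_dir : Int) (actions : List Int) : Decidable (Pre_actions_to_world_coords_py start_pos start_dir actions) := by unfold Pre_actions_to_world_coords_py; infer_instance

def pvWitness_actions_to_world_coords_py : (Int × Int) × Int × List Int := ((2, -1), 3, [2, 0, 2, 2, 1, 2])

def Spec_actions_to_world_coords_py (start_pos : Int × Int) (start_dir : Int) (actions : List Int) (out : List (Int × Int)) : Prop := out = actions_to_world_coords_py_alt start_pos start_dir actions
instance (start_pos : Int × Int) (start_dir : Int) (actions : List Int) (out : List (Int × Int)) : Decidable (Spec_actions_to_world_coords_py start_pos start_dir actions out) := by unfold Spec_actions_to_world_coords_py; infer_instance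

-- ===== CLAIM =====
def Claim_equal_actions_to_world_coords_py : Prop := ∀ (start_pos : Int × Int) (start_dir : Int) (actions : List Int), Dom_actions_to_world_coords_py start_pos start_dir actions → Pre_actions_to_world_coords_py start_pos start_dir actions → Spec_actions_to_world_coords_py start_pos start_dir actions (actions_to_world_coords_py start_pos start_dir actions)

-- ===== LEMMAS AND PROOFS =====

-- B's stages 1+2 fused into one function of the starting heading (proof-only helper;
-- definitionally the composition used by the port).
def pvGB (d : Int) (actions : List Int) : List (Int × Int) :=
  pvForwardDeltas (actions.zip (pvHeads d actions))

theorem pvGB_nil (d : Int) : pvGB d [] = [] := rfl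

theorem pvGB_turnL (d : Int) (r : List Int) : pvGB d (0 :: r) = pvGB (d - 1) r := by
  simp [pvGB, pvHeads, pvForwardDeltas, sub_eq_add_neg]

theorem pvGB_turnR (d : Int) (r : List Int) : pvGB d (1 :: r) = pvGB (d + 1) r := by
  simp [pvGB, pvHeads, pvForwardDeltas]

theorem pvGB_fwd (d a : Int) (r : List Int) (h0 : a ≠ 0) (h1 : a ≠ 1) :
    pvGB d (a :: r) =
      ((PySem.List.pyGet? pvDirVecs (PySem.Int.mod d 4)).getD (0, 0)) :: pvGB d r := by
  simp [pvGB, pvHeads, pvForwardDeltas, h0, h1]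

-- pvGB only depends on the heading modulo 4.
theorem pvGB_congr (actions : List Int) : ∀ (d d' : Int),
    PySem.Int.mod d 4 = PySem.Int.mod d' 4 → pvGB d actions = pvGB d' actions := by
  induction actions with
  | nil => intro d d' _; rfl
  | cons a r ih =>
    intro d d' h
    by_cases ha0 : a = 0
    · subst ha0
      rw [pvGB_turnL, pvGB_turnL]
      refine ih _ _ ?_
      simp only [PySem.Int.mod_eq_emod_of_pos (by norm_num : (0:Int) < 4)] at h ⊢
      omega
    · by_cases ha1 : a = 1
      · subst ha1
        rw [pvGB_turnR, pvGB_turnR]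
        refine ih _ _ ?_
        simp only [PySem.Int.mod_eq_emod_of_pos (by norm_num : (0:Int) < 4)] at h ⊢
        omega
      · rw [pvGB_fwd d a r ha0 ha1, pvGB_fwd d' a r ha0 ha1, h, ih d d' h]

theorem pvGet_mod (d : Int) (h1 : -4 ≤ d) (h2 : d < 4) :
    PySem.List.pyGet? pvDirVecs d = PySem.List.pyGet? pvDirVecs (PySem.Int.mod d 4) := by
  interval_cases d <;> decide

theorem pvMod_range (d : Int) : 0 ≤ PySem.Int.mod d 4 ∧ PySem.Int.mod d 4 < 4 := by
  rw [PySem.Int.mod_eq_emod_of_pos (by norm_num)]; omega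

theorem pvMod_idem_sub (d : Int) :
    PySem.Int.mod (PySem.Int.mod (d - 1) 4) 4 = PySem.Int.mod (d - 1) 4 := by
  simp only [PySem.Int.mod_eq_emod_of_pos (by norm_num : (0:Int) < 4)]; omega

theorem pvMod_idem_add (d : Int) :
    PySem.Int.mod (PySem.Int.mod (d + 1) 4) 4 = PySem.Int.mod (d + 1) 4 := by
  simp only [PySem.Int.mod_eq_emod_of_pos (by norm_num : (0:Int) < 4)]; omega

-- Main invariant: for d in A's indexable range, A's threaded loop equals B's
-- deltas-then-prefix-sum composition.
theorem pvGoA_eq (actions : List Int) : ∀ (x y d : Int), -4 ≤ d → d < 4 →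
    pvGoA x y d actions = pvPrefix x y (pvGB d actions) := by
  induction actions with
  | nil => intro x y d _ _; simp [pvGoA, pvGB_nil, pvPrefix]
  | cons a rest ih =>
    intro x y d h1 h2
    by_cases ha0 : a = 0
    · subst ha0
      have hr := pvMod_range (d - 1)
      rw [pvGoA, if_pos rfl, pvGB_turnL,
        pvGB_congr rest (d - 1) (PySem.Int.mod (d - 1) 4) (pvMod_idem_sub d).symm]
      exact ih x y _ (by omega) hr.2
    · by_cases ha1 : a = 1
      · subst ha1
        have hr := pvMod_range (d + 1)
        rw [pvGoA, if_neg ha0, if_pos rfl, pvGB_turnR,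
          pvGB_congr rest (d + 1) (PySem.Int.mod (d + 1) 4) (pvMod_idem_add d).symm]
        exact ih x y _ (by omega) hr.2
      · rw [pvGoA, if_neg ha0, if_neg ha1, pvGB_fwd d a rest ha0 ha1, pvGet_mod d h1 h2]
        have hr := pvMod_range d
        have : ∃ dx dy, PySem.List.pyGet? pvDirVecs (PySem.Int.mod d 4) = some (dx, dy) := by
          have := hr.1; have := hr.2
          interval_cases h : (PySem.Int.mod d 4) <;> exact ⟨_, _, rfl⟩
        obtain ⟨dx, dy, hget⟩ := this
        rw [hget]
        simp only [Option.getD_some, pvPrefix]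
        exact congrArg _ (ih (x + dx) (y + dy) d h1 h2)

-- ===== VERDICT =====
theorem actions_to_world_coords_py_spec : Claim_equal_actions_to_world_coords_py := by
  intro ⟨x, y⟩ start_dir actions _ hpre
  unfold Spec_actions_to_world_coords_py actions_to_world_coords_py actions_to_world_coords_py_alt
  show pvGoA x y start_dir actions = pvPrefix x y (pvGB start_dir actions)
  rcases hpre with ⟨h1, h2⟩ | h | h | h
  · exact pvGoA_eq actions x y start_dir h1 h2
  · -- first action is a left turn: one unfolding step, then the invariant
    obtain ⟨rest, rfl⟩ : ∃ rest, actions = 0 :: rest := by cases actions <;> simp_all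
    have hr := pvMod_range (start_dir - 1)
    rw [pvGoA, if_pos rfl, pvGB_turnL,
      pvGB_congr rest (start_dir - 1) (PySem.Int.mod (start_dir - 1) 4) (pvMod_idem_sub _).symm]
    exact pvGoA_eq rest x y _ (by omega) hr.2
  · -- first action is a right turn
    obtain ⟨rest, rfl⟩ : ∃ rest, actions = 1 :: rest := by cases actions <;> simp_all
    have hr := pvMod_range (start_dir + 1)
    rw [pvGoA, if_neg (by norm_num), if_pos rfl, pvGB_turnR,
      pvGB_congr rest (start_dir + 1) (PySem.Int.mod (start_dir + 1) 4) (pvMod_idem_add _).symm]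
    exact pvGoA_eq rest x y _ (by omega) hr.2
  · subst h; rfl
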